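-- pv_equiv track=rewrite | github.com/zacharst/DB-Projekt | components/table_editor.py | _parse_enum_options
-- ===== SOURCE A (Python) =====
-- def _parse_enum_options(type_str: str):
--     """Wenn type_str ein enum(...) ist, liefert eine Liste der Optionen, sonst None"""
--     if isinstance(type_str, str) and type_str.lower().startswith("enum("):
--         inner = type_str[type_str.find("(")+1:type_str.rfind(")")]
--         # inner: "'opt1','opt2'"
--         opts = []
--         cur = ""
--         in_quote = False
--         for ch in inner:
--             if ch == "'" and not in_quote:
--                 in_quote = True
--                 cur = ""
--             elif ch == "'" and in_quote:
--                 in_quote = False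
--                 opts.append(cur)
--             elif in_quote:
--                 cur += ch
--             else:
--                 continue
--         return opts
--     return None
-- ===== SOURCE B (Python) =====
-- import re
--
-- def _parse_enum_options(type_str: str):
--     """Wenn type_str ein enum(...) ist, liefert eine Liste der Optionen, sonst None"""
--     if isinstance(type_str, str) and type_str.lower().startswith("enum("):
--         inner = type_str[type_str.find("(")+1:type_str.rfind(")")]
--         return re.findall(r"'([^']*)'", inner)
--     return None
-- ===== Notes on version B (the rewrite author's own statement) =====
-- stated objective: idiomatic
-- what changed: The hand-written character-by-character quote-toggle state machine over inner is replaced by a single regex findall of single-quoted chunks (quote, run of non-quote characters, quote, matched non-overlapping left to right), which yields exactly the same options list.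
import Mathlib
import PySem

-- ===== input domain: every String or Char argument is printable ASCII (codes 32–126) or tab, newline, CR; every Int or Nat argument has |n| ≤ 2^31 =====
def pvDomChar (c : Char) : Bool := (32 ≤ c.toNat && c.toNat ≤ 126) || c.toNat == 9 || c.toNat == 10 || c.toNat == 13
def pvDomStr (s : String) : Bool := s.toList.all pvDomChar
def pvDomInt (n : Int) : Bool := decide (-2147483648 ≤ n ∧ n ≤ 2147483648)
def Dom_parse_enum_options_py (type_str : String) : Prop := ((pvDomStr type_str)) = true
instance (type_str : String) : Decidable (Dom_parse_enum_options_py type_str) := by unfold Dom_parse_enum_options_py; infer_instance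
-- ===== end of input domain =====

-- B replaces A's character-by-character quote-toggle state machine with a regex findall of
-- non-overlapping single-quoted chunks; same return value everywhere (objective: idiomatic).

-- ===== PORT A =====
-- one step of the 'for ch in inner' loop: state = (opts, cur, in_quote)
def pvStepA (st : List String × List Char × Bool) (ch : Char) : List String × List Char × Bool :=
  if ch = '\'' && !st.2.2 then (st.1, [], true)
  else if ch = '\'' && st.2.2 then (st.1 ++ [String.ofList st.2.1], st.2.1, false)
  else if st.2.2 then (st.1, st.2.1 ++ [ch], true)
  else st

def parse_enum_options_py (type_str : String) : Option (List String) :=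
  if PySem.Str.startswith (PySem.Str.lower type_str) "enum(" then
    let inner := PySem.Str.slice type_str (some (PySem.Str.find type_str "(" + 1))
                                          (some (PySem.Str.rfind type_str ")"))
    some (inner.toList.foldl pvStepA ([], [], false)).1
  else
    none

-- ===== PORT B =====
-- re.findall of the quoted-chunk pattern: left-to-right non-overlapping matches; each match skips to the
-- next quote, captures the run of non-quote chars, and requires a closing quote.
def pvFindAllQuoted (l : List Char) : List String :=
  let l1 := l.dropWhile (· ≠ '\'')
  if h1 : l1 = [] then []
  else
    let rest := l1.tail
    let l2 := rest.dropWhile (· ≠ '\'')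
    if h2 : l2 = [] then []
    else String.ofList (rest.takeWhile (· ≠ '\'')) :: pvFindAllQuoted l2.tail
termination_by l.length
decreasing_by
  have a1 := List.length_dropWhile_le (fun c => decide (c ≠ '\'')) l
  have a2 := List.length_dropWhile_le (fun c => decide (c ≠ '\'')) (l.dropWhile (fun c => decide (c ≠ '\''))).tail
  have b1 : l1.length ≠ 0 := fun hn => h1 (List.eq_nil_of_length_eq_zero hn)
  have b2 : l2.length ≠ 0 := fun hn => h2 (List.eq_nil_of_length_eq_zero hn)
  simp only [l1, l2, rest, List.length_tail] at *
  omega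

def parse_enum_options_py_alt (type_str : String) : Option (List String) :=
  if PySem.Str.startswith (PySem.Str.lower type_str) "enum(" then
    let inner := PySem.Str.slice type_str (some (PySem.Str.find type_str "(" + 1))
                                          (some (PySem.Str.rfind type_str ")"))
    some (pvFindAllQuoted inner.toList)
  else
    none

-- ===== PRECONDITION & SPEC =====
def Spec_parse_enum_options_py (type_str : String) (out : Option (List String)) : Prop := out = parse_enum_options_py_alt type_str
instance (type_str : String) (out : Option (List String)) : Decidable (Spec_parse_enum_options_py type_str out) := by unfold Spec_parse_enum_options_py; infer_instance

-- ===== CLAIM (what is proved, stated in full; the proofs are below) =====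
def Claim_equal_parse_enum_options_py : Prop := ∀ (type_str : String), Dom_parse_enum_options_py type_str → Spec_parse_enum_options_py type_str (parse_enum_options_py type_str)

-- ===== LEMMAS AND PROOFS =====

theorem pvStepA_quote_false (o : List String) (c : List Char) :
    pvStepA (o, c, false) '\'' = (o, [], true) := by simp [pvStepA]

theorem pvStepA_quote_true (o : List String) (c : List Char) :
    pvStepA (o, c, true) '\'' = (o ++ [String.ofList c], c, false) := by simp [pvStepA]

theorem pvStepA_ne_false (o : List String) (c : List Char) {ch : Char} (h : ch ≠ '\'') :
    pvStepA (o, c, false) ch = (o, c, false) := by simp [pvStepA, h]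

theorem pvStepA_ne_true (o : List String) (c : List Char) {ch : Char} (h : ch ≠ '\'') :
    pvStepA (o, c, true) ch = (o, c ++ [ch], true) := by simp [pvStepA, h]

theorem pvFAQ_cons_ne {ch : Char} (l : List Char) (h : ch ≠ '\'') :
    pvFindAllQuoted (ch :: l) = pvFindAllQuoted l := by
  conv_lhs => rw [pvFindAllQuoted]
  conv_rhs => rw [pvFindAllQuoted]
  simp [List.dropWhile_cons, h]

theorem pvFAQ_cons_quote (l : List Char) :
    pvFindAllQuoted ('\'' :: l) =
      if l.dropWhile (· ≠ '\'') = [] then []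
      else String.ofList (l.takeWhile (· ≠ '\'')) :: pvFindAllQuoted (l.dropWhile (· ≠ '\'')).tail := by
  rw [pvFindAllQuoted]
  simp [List.dropWhile_cons]

-- Core invariant, both loop states at once:
-- out of quote: the fold appends exactly the findall matches;
-- in quote with partial option c: if a closing quote exists, c ++ (chars up to it) is emitted
-- and scanning continues after it; otherwise the partial option is dropped.
theorem pvFold_invariant (l : List Char) :
    (∀ o c, (l.foldl pvStepA (o, c, false)).1 = o ++ pvFindAllQuoted l) ∧
    (∀ o c, (l.foldl pvStepA (o, c, true)).1 =
      if l.dropWhile (· ≠ '\'') = [] then o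
      else o ++ [String.ofList (c ++ l.takeWhile (· ≠ '\''))]
             ++ pvFindAllQuoted (l.dropWhile (· ≠ '\'')).tail) := by
  induction l with
  | nil => constructor <;> intro o c <;> simp [pvFindAllQuoted]
  | cons ch l ih =>
    obtain ⟨ihF, ihT⟩ := ih
    by_cases hch : ch = '\''
    · subst hch
      constructor
      · intro o c
        rw [List.foldl_cons, pvStepA_quote_false, ihT o [], pvFAQ_cons_quote]
        split_ifs <;> simp
      · intro o c
        rw [List.foldl_cons, pvStepA_quote_true, ihF (o ++ [String.ofList c]) c]
        simp [List.dropWhile_cons, List.takeWhile_cons]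
    · constructor
      · intro o c
        rw [List.foldl_cons, pvStepA_ne_false o c hch, ihF o c, pvFAQ_cons_ne l hch]
      · intro o c
        rw [List.foldl_cons, pvStepA_ne_true o c hch, ihT o (c ++ [ch])]
        simp [List.dropWhile_cons, List.takeWhile_cons, hch]

-- ===== VERDICT (by name: the statement is the Claim_ definition above) =====
theorem parse_enum_options_py_spec : Claim_equal_parse_enum_options_py := by
  intro type_str _
  unfold Spec_parse_enum_options_py parse_enum_options_py parse_enum_options_py_alt
  split
  · show some _ = some _
    exact congrArg some (((pvFold_invariant _).1 [] []).trans (List.nil_append _))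
  · rfl
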